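-- pv_equiv track=rewrite | github.com/ShiremanSun/bj-2024-software-test | tests.py | split_string_with_offsets
-- ===== SOURCE A (Python) =====
-- def split_string_with_offsets(content, n_values):
--     results = []
--     case_number = 1
--
--     for N in n_values:
--         case_result = [f"Case {case_number}:"]
--         len_content = len(content)
--         for offset in range(1, N + 1):
--             substrings = []
--
--             # 先输出 offset 个字符
--             substrings.append(content[:offset])
--
--             # 按 N 间隔输出子串
--             for j in range(offset, len_content, N):
--                 substrings.append(content[j:j+N])
--
--             case_result.append(" ".join(substrings))
--         results.append("\n".join(case_result))
--         case_number += 1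
--
--     return results
-- ===== SOURCE B (Python) =====
-- def split_string_with_offsets(content, n_values):
--     # Character-streaming rebuild: instead of slicing content into pieces and
--     # joining them, emit content once per offset, inserting a space before every
--     # character whose index i satisfies i >= offset and (i - offset) % N == 0.
--     out = []
--     for case_number, N in enumerate(n_values, 1):
--         lines = ["Case %d:" % case_number]
--         for offset in range(1, N + 1):
--             buf = []
--             for i, ch in enumerate(content):
--                 if i >= offset and (i - offset) % N == 0:
--                     buf.append(' ')
--                 buf.append(ch)
--             lines.append(''.join(buf))
--         out.append('\n'.join(lines))
--     return out
-- ===== Notes on version B (the rewrite author's own statement) =====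
-- stated objective: alternative
-- what changed: B never slices: it streams over the characters of content once per offset line, inserting a space before every character whose index i satisfies i >= offset and (i - offset) % N == 0, instead of A's build-pieces-then-join of a first slice plus strided chunk slices; cases come from enumerate instead of a hand-kept counter.
import Mathlib
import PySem

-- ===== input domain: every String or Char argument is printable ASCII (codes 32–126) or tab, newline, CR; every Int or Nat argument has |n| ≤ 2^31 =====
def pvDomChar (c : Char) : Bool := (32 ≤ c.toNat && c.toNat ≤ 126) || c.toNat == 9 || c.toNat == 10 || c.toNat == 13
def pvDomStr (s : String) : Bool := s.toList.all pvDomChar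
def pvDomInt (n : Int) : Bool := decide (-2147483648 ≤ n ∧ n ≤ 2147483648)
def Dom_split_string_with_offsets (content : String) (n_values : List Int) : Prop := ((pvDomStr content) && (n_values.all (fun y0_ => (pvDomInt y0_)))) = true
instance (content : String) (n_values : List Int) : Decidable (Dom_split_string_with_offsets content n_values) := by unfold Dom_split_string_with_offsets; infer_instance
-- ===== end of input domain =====

-- B streams over the characters once per offset line, inserting a space before each character
-- at a cut index (i >= offset and (i-offset) % N == 0), instead of A's slice-pieces-then-join; objective: alternative.


-- ===== PORT A =====
def split_string_with_offsets (content : String) (n_values : List Int) : List String :=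
  (n_values.foldl
    (fun (st : List String × Int) N =>
      -- case_result = ["Case {case_number}:"] ; len_content = len(content)
      let len_content : Int := PySem.Str.len content
      let case_result : List String :=
        (PySem.List.pyRange 1 (N + 1) 1).foldl
          (fun cr offset =>
            -- substrings = [content[:offset]]; then content[j:j+N] for j in range(offset, len_content, N)
            let substrings : List String :=
              (PySem.List.pyRange offset len_content N).foldl
                (fun ss j => ss ++ [PySem.Str.slice content (some j) (some (j + N))])
                [PySem.Str.slice content none (some offset)]
            cr ++ [PySem.Str.join " " substrings])
          ["Case " ++ PySem.Int.toStr st.2 ++ ":"]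
      (st.1 ++ [PySem.Str.join "\n" case_result], st.2 + 1))
    ([], 1)).1

-- ===== PORT B =====
def split_string_with_offsets_alt (content : String) (n_values : List Int) : List String :=
  (PySem.List.enumerate n_values 1).map (fun p =>
    let lines : List String :=
      ("Case " ++ PySem.Int.toStr p.1 ++ ":") ::
        (PySem.List.pyRange 1 (p.2 + 1) 1).map (fun offset =>
          -- buf = []; for i, ch in enumerate(content): if i>=offset and (i-offset)%N==0: buf.append(' '); buf.append(ch)
          let buf : List Char :=
            (PySem.List.enumerate content.toList 0).foldl
              (fun buf iq =>
                (if offset ≤ iq.1 ∧ PySem.Int.mod (iq.1 - offset) p.2 = 0 then buf ++ [' '] else buf)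
                  ++ [iq.2])
              []
          String.ofList buf)
    PySem.Str.join "\n" lines)

-- ===== PRECONDITION & SPEC =====
def Spec_split_string_with_offsets (content : String) (n_values : List Int) (out : List String) : Prop := out = split_string_with_offsets_alt content n_values
instance (content : String) (n_values : List Int) (out : List String) : Decidable (Spec_split_string_with_offsets content n_values out) := by unfold Spec_split_string_with_offsets; infer_instance

-- ===== CLAIM (what is proved, stated in full; the proofs are below) =====
def Claim_equal_split_string_with_offsets : Prop := ∀ (content : String) (n_values : List Int), Dom_split_string_with_offsets content n_values → Spec_split_string_with_offsets content n_values (split_string_with_offsets content n_values)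

-- ===== LEMMAS AND PROOFS =====

-- the space-insertion rule of B's stream, as a flatMap body
def pvG (offset N : Int) (iq : Int × Char) : List Char :=
  if offset ≤ iq.1 ∧ PySem.Int.mod (iq.1 - offset) N = 0 then [' ', iq.2] else [iq.2]

-- B's per-line fold is the flatMap of pvG over the enumeration
lemma fold_eq_flatMap (offset N : Int) (l : List (Int × Char)) :
    l.foldl
      (fun buf iq =>
        (if offset ≤ iq.1 ∧ PySem.Int.mod (iq.1 - offset) N = 0 then buf ++ [' '] else buf)
          ++ [iq.2])
      []
      = l.flatMap (pvG offset N) := by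
  have h : (fun (buf : List Char) (iq : Int × Char) =>
      (if offset ≤ iq.1 ∧ PySem.Int.mod (iq.1 - offset) N = 0 then buf ++ [' '] else buf) ++ [iq.2])
      = fun buf iq => buf ++ pvG offset N iq := by
    funext buf iq
    unfold pvG
    split_ifs <;> simp
  rw [h, PySem.List.foldl_append_eq_flatMap]
  simp

-- a segment none of whose indices is a cut index streams through unchanged
lemma flatMap_no_hit (offset N : Int) :
    ∀ (l : List Char) (s : Int),
      (∀ k : Nat, k < l.length → ¬(offset ≤ s + k ∧ PySem.Int.mod (s + k - offset) N = 0)) →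
      (PySem.List.enumerate l s).flatMap (pvG offset N) = l := by
  intro l
  induction l with
  | nil => intro s _; simp [PySem.List.enumerate_nil]
  | cons x xs ih =>
      intro s h
      rw [PySem.List.enumerate_cons, List.flatMap_cons]
      have h0 := h 0 (by simp)
      simp only [Nat.cast_zero, add_zero] at h0
      rw [show pvG offset N (s, x) = [x] from by unfold pvG; rw [if_neg h0]]
      rw [ih (s + 1) (fun k hk => by
        have := h (k + 1) (by simpa using Nat.succ_lt_succ hk)
        push_cast at this ⊢
        convert this using 3 <;> ring_nf)]
      simp

-- positive-step range: cons decomposition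
lemma pyRange_pos_cons (a b N : Int) (hN : 0 < N) (hab : a < b) :
    PySem.List.pyRange a b N = a :: PySem.List.pyRange (a + N) b N := by
  rw [PySem.List.pyRange_of_pos a b hN, PySem.List.pyRange_of_pos (a + N) b hN, if_pos hab]
  by_cases h2 : a + N < b
  · rw [if_pos h2]
    have key : (b - a + N - 1) / N = (b - (a + N) + N - 1) / N + 1 := by
      have h3 := Int.add_mul_ediv_right (b - a - 1) 1 (ne_of_gt hN)
      have e1 : b - a + N - 1 = b - a - 1 + 1 * N := by ring
      have e2 : b - (a + N) + N - 1 = b - a - 1 := by ring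
      rw [e1, e2, h3]
    have hnn : 0 ≤ (b - (a + N) + N - 1) / N := by
      apply Int.ediv_nonneg <;> omega
    rw [key, show ((b - (a + N) + N - 1) / N + 1).toNat = ((b - (a + N) + N - 1) / N).toNat + 1 from by omega]
    rw [List.range_succ_eq_map, List.map_cons, List.map_map]
    simp only [Nat.cast_zero, mul_zero, add_zero, List.cons.injEq, true_and]
    apply List.map_congr_left
    intro k _
    simp only [Function.comp_apply]
    push_cast
    ring
  · rw [if_neg h2]
    have h1 : (1 : Int) ≤ (b - a + N - 1) / N := by
      rw [Int.le_ediv_iff_mul_le hN]; omega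
    have hlt : (b - a + N - 1) / N < 2 := by
      rw [Int.ediv_lt_iff_lt_mul hN]; omega
    rw [show ((b - a + N - 1) / N).toNat = 1 from by omega]
    simp

lemma pyRange_pos_nil (a b N : Int) (hN : 0 < N) (hab : b ≤ a) :
    PySem.List.pyRange a b N = [] := by
  rw [PySem.List.pyRange_of_pos a b hN, if_neg (by omega)]
  simp

-- main chunk invariant: from a cut index j on, the stream equals the space-prefixed chunks
lemma chunk_main (cs : List Char) (N offset : Int) (hN : 0 < N) (hoff : 0 ≤ offset) :
    ∀ (fuel : Nat) (j : Int), offset ≤ j → cs.length ≤ j.toNat + fuel → N ∣ (j - offset) →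
      (PySem.List.enumerate (cs.drop j.toNat) j).flatMap (pvG offset N)
        = (PySem.List.pyRange j (cs.length : Int) N).flatMap
            (fun k => ' ' :: PySem.List.slice cs (some k) (some (k + N))) := by
  intro fuel
  induction fuel with
  | zero =>
      intro j hj hlen _
      have hd : cs.drop j.toNat = [] := List.drop_eq_nil_of_le (by omega)
      have hr : PySem.List.pyRange j (cs.length : Int) N = [] :=
        pyRange_pos_nil _ _ _ hN (by omega)
      rw [hd, hr]
      simp [PySem.List.enumerate_nil]
  | succ f ih =>
      intro j hj hlen hdvd
      by_cases hjL : (cs.length : Int) ≤ j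
      · have hd : cs.drop j.toNat = [] := List.drop_eq_nil_of_le (by omega)
        have hr : PySem.List.pyRange j (cs.length : Int) N = [] :=
          pyRange_pos_nil _ _ _ hN hjL
        rw [hd, hr]
        simp [PySem.List.enumerate_nil]
      · push_neg at hjL
        have hjc : j.toNat < cs.length := by omega
        have hd : cs.drop j.toNat = cs[j.toNat]'hjc :: cs.drop (j.toNat + 1) :=
          List.drop_eq_getElem_cons hjc
        have hd'len : (cs.drop (j.toNat + 1)).length = cs.length - (j.toNat + 1) := by
          simp
        -- split the tail at the next cut
        have hsplit : cs.drop (j.toNat + 1)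
            = (cs.drop (j.toNat + 1)).take (N.toNat - 1) ++ (cs.drop (j.toNat + 1)).drop (N.toNat - 1) :=
          (List.take_append_drop _ _).symm
        rw [hd, PySem.List.enumerate_cons, List.flatMap_cons]
        conv_lhs => rw [hsplit]
        rw [PySem.List.enumerate_append, List.flatMap_append]
        -- head character gets a space
        have hhead : pvG offset N (j, cs[j.toNat]'hjc) = [' ', cs[j.toNat]'hjc] := by
          unfold pvG
          rw [if_pos ⟨hj, (PySem.Int.mod_eq_zero_iff_dvd _ _).mpr hdvd⟩]
        -- the inner segment has no cut index
        have hmid : (PySem.List.enumerate ((cs.drop (j.toNat + 1)).take (N.toNat - 1)) (j + 1)).flatMap (pvG offset N)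
            = (cs.drop (j.toNat + 1)).take (N.toNat - 1) := by
          apply flatMap_no_hit
          intro k hk ⟨_, hmod⟩
          have hkN : (k : Int) + 1 < N := by
            have := List.length_take_le (N.toNat - 1) (cs.drop (j.toNat + 1))
            omega
          have hd2 : N ∣ (j + 1 + k - offset) := (PySem.Int.mod_eq_zero_iff_dvd _ _).mp hmod
          have hd3 : N ∣ ((k : Int) + 1) := by
            have := dvd_sub hd2 hdvd
            simpa [show j + 1 + (k : Int) - offset - (j - offset) = (k : Int) + 1 from by ring] using this
          have := Int.le_of_dvd (by omega) hd3
          omega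
        -- the range is nonempty: first chunk is j : j+N
        rw [pyRange_pos_cons j (cs.length : Int) N hN hjL, List.flatMap_cons]
        have hslice : PySem.List.slice cs (some j) (some (j + N)) = cs[j.toNat]'hjc :: (cs.drop (j.toNat + 1)).take (N.toNat - 1) := by
          rw [PySem.List.slice_toNat cs (by omega) (by omega)]
          rw [hd]
          rw [show (j + N).toNat - j.toNat = (N.toNat - 1) + 1 from by omega]
          rw [List.take_succ_cons]
        rw [hslice, hhead, hmid]
        -- the remainder: either recurse at j + N, or everything is empty
        have htail : (PySem.List.enumerate ((cs.drop (j.toNat + 1)).drop (N.toNat - 1)) (j + 1 + (((cs.drop (j.toNat + 1)).take (N.toNat - 1)).length : Int))).flatMap (pvG offset N)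
            = (PySem.List.pyRange (j + N) (cs.length : Int) N).flatMap
                (fun k => ' ' :: PySem.List.slice cs (some k) (some (k + N))) := by
          have hdropdrop : (cs.drop (j.toNat + 1)).drop (N.toNat - 1) = cs.drop (j + N).toNat := by
            rw [List.drop_drop]
            congr 1
            omega
          by_cases hlong : N.toNat - 1 ≤ (cs.drop (j.toNat + 1)).length
          · have hlen2 : ((cs.drop (j.toNat + 1)).take (N.toNat - 1)).length = N.toNat - 1 := by
              simp [List.length_take]
              omega
            rw [hlen2, hdropdrop, show j + 1 + ((N.toNat - 1 : Nat) : Int) = j + N from by push_cast; omega]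
            exact ih (j + N) (by omega) (by omega) (by
              have : j + N - offset = (j - offset) + N := by ring
              rw [this]
              exact dvd_add hdvd dvd_rfl)
          · push_neg at hlong
            have h1 : (cs.drop (j.toNat + 1)).drop (N.toNat - 1) = [] := List.drop_eq_nil_of_le (by omega)
            have h2 : PySem.List.pyRange (j + N) (cs.length : Int) N = [] := by
              apply pyRange_pos_nil _ _ _ hN
              omega
            rw [h1, h2]
            simp [PySem.List.enumerate_nil]
        rw [htail]
        simp

-- whole line, character level: B's stream equals A's first piece plus chunks
lemma line_eq (cs : List Char) (N offset : Int) (hN : 0 < N) (h1 : 1 ≤ offset) :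
    (PySem.List.enumerate cs 0).flatMap (pvG offset N)
      = PySem.List.slice cs none (some offset)
        ++ (PySem.List.pyRange offset (cs.length : Int) N).flatMap
            (fun k => ' ' :: PySem.List.slice cs (some k) (some (k + N))) := by
  conv_lhs => rw [show cs = cs.take offset.toNat ++ cs.drop offset.toNat from (List.take_append_drop _ _).symm]
  rw [PySem.List.enumerate_append, List.flatMap_append]
  have hpre : (PySem.List.enumerate (cs.take offset.toNat) 0).flatMap (pvG offset N)
      = cs.take offset.toNat := by
    apply flatMap_no_hit
    intro k hk ⟨hle, _⟩
    have := List.length_take_le offset.toNat cs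
    have : (k : Int) < offset := by omega
    omega
  rw [hpre, PySem.List.slice_to cs (by omega)]
  congr 1
  by_cases hoffL : offset ≤ (cs.length : Int)
  · have hlen : ((cs.take offset.toNat).length : Int) = offset := by
      simp [List.length_take]
      omega
    rw [hlen, zero_add]
    exact chunk_main cs N offset hN (by omega) cs.length offset le_rfl (by omega) (by simp)
  · push_neg at hoffL
    have h1' : cs.drop offset.toNat = [] := List.drop_eq_nil_of_le (by omega)
    have h2' : PySem.List.pyRange offset (cs.length : Int) N = [] :=
      pyRange_pos_nil _ _ _ hN (by omega)
    rw [h1', h2']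
    simp [PySem.List.enumerate_nil]

-- intercalating a single separator is a flatMap with a prefixed separator
lemma intercalate_singleton_cons {α : Type} (a : α) :
    ∀ (ys : List (List α)) (x : List α),
      [a].intercalate (x :: ys) = x ++ ys.flatMap (fun y => a :: y) := by
  intro ys
  induction ys with
  | nil => intro x; simp [List.intercalate]
  | cons y t ih =>
      intro x
      rw [List.flatMap_cons]
      simp only [List.intercalate] at *
      rw [List.intersperse_cons₂, List.flatten_cons, List.flatten_cons, ih y]
      simp

-- one output line, as strings
lemma line_str_eq (content : String) (N offset : Int) (hN : 0 < N) (h1 : 1 ≤ offset) :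
    PySem.Str.join " "
        ((PySem.List.pyRange offset (PySem.Str.len content) N).foldl
          (fun ss j => ss ++ [PySem.Str.slice content (some j) (some (j + N))])
          [PySem.Str.slice content none (some offset)])
      = String.ofList
          ((PySem.List.enumerate content.toList 0).foldl
            (fun buf iq =>
              (if offset ≤ iq.1 ∧ PySem.Int.mod (iq.1 - offset) N = 0 then buf ++ [' '] else buf)
                ++ [iq.2])
            []) := by
  apply String.toList_injective
  rw [fold_eq_flatMap, PySem.List.foldl_append_singleton_eq_map, List.singleton_append]
  rw [PySem.Str.toList_join, PySem.Chars.join]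
  simp only [List.map_cons, List.map_map, PySem.Str.toList_slice, PySem.Chars.slice_eq_listSlice,
    PySem.Str.len_eq, Function.comp_def]
  rw [show (" " : String).toList = [' '] from rfl]
  rw [intercalate_singleton_cons]
  simp only [String.toList_ofList]
  rw [line_eq content.toList N offset hN h1]
  congr 1
  rw [List.flatMap_map]

-- folding a counter-carrying append over a list is a map over its enumeration
lemma foldl_counter (f : Int → Int → String) :
    ∀ (ns : List Int) (acc : List String) (k : Int),
      (ns.foldl (fun (st : List String × Int) N => (st.1 ++ [f st.2 N], st.2 + 1)) (acc, k)).1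
        = acc ++ (PySem.List.enumerate ns k).map (fun p => f p.1 p.2) := by
  intro ns
  induction ns with
  | nil => intro acc k; simp [PySem.List.enumerate_nil]
  | cons N rest ih =>
      intro acc k
      rw [List.foldl_cons, PySem.List.enumerate_cons]
      rw [ih (acc ++ [f k N]) (k + 1)]
      simp

-- ===== VERDICT (by name: the statement is the Claim_ definition above) =====
theorem split_string_with_offsets_spec : Claim_equal_split_string_with_offsets := by
  intro content n_values _
  unfold Spec_split_string_with_offsets split_string_with_offsets split_string_with_offsets_alt
  simp only []
  rw [foldl_counter (fun k N =>
    PySem.Str.join "\n"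
      ((PySem.List.pyRange 1 (N + 1) 1).foldl
        (fun cr offset =>
          cr ++ [PySem.Str.join " "
            ((PySem.List.pyRange offset (PySem.Str.len content) N).foldl
              (fun ss j => ss ++ [PySem.Str.slice content (some j) (some (j + N))])
              [PySem.Str.slice content none (some offset)])])
        ["Case " ++ PySem.Int.toStr k ++ ":"])) n_values [] 1]
  simp only [List.nil_append]
  apply List.map_congr_left
  intro p _
  congr 1
  rw [PySem.List.foldl_append_singleton_eq_map, List.singleton_append]
  congr 1
  apply List.map_congr_left
  intro offset hmem
  rw [PySem.List.mem_pyRange_one] at hmem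
  exact line_str_eq content p.2 offset (by omega) hmem.1
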